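-- pv_equiv track=rewrite | github.com/Boubker10/ROBOT-Kibouki-Coppelia | map-preprocessor.py | RefineTrajectory
-- ===== SOURCE A (Python) =====
-- def DerivateCoord( lstCoords):
--     n = len(lstCoords)
--     lstDerCoords = []
--     if n >= 2:
--         for i in range(n-1):
--             dx = lstCoords[i+1][0] - lstCoords[i][0]
--             dy = lstCoords[i+1][1] - lstCoords[i][1]
--             lstDerCoords.append([dx,dy])
--     else:
--         lstDerCoords.append([0,0])
--     return lstDerCoords
--
-- def RefineTrajectory( lstCoords ):
--     # on derive 2 fois la sequence de coordonnees
--     # et on s'interesse aux indices pour lesquels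
--     # la derivee seconde est non-nulle :
--     lstD1Coords = DerivateCoord( lstCoords)
--     lstD2Coords = DerivateCoord( lstD1Coords)
--     lstChanges=[]
--     n = len(lstD2Coords)
--     for i in range(n):
--         if (lstD2Coords[i][0] == 0 ) and (lstD2Coords[i][1] == 0):
--             lstChanges.append(0)    # pas de changement
--         else:
--             lstChanges.append(1)    # changement
--     # on repere maintenant l'ensemble des indices pour lequel un
--     # changement est observe :
--     # on en deduit les indices des cellules ou s'operent
--     # un changement de direction (on ajoute 1...)
--     lstIndex = []
--     n =len( lstChanges )
--     for i in range(n):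
--         if lstChanges[i] != 0:
--             lstIndex.append(i+1)
--     # a partir de la, on peut "epurer" la liste
--     # des coordonnes de cellules a joindre par
--     # une ligne droite :
--     lstFilteredCoords=[lstCoords[0]]
--     for i in range(len(lstIndex)):
--         lstFilteredCoords.append(lstCoords[lstIndex[i]])
--     # OK
--     return lstFilteredCoords
-- ===== SOURCE B (Python) =====
-- def RefineTrajectory(lstCoords):
--     result = [lstCoords[0]]
--     for j in range(1, len(lstCoords) - 1):
--         p, c, nxt = lstCoords[j - 1], lstCoords[j], lstCoords[j + 1]
--         if nxt[0] - c[0] != c[0] - p[0] or nxt[1] - c[1] != c[1] - p[1]: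
--             result.append(c)
--     return result
-- ===== Notes on version B (the rewrite author's own statement) =====
-- stated objective: simpler
-- what changed: Single pass comparing consecutive first differences directly, appending the point where they change; no intermediate derivative, flag or index lists and no DerivateCoord helper.
import Mathlib
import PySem

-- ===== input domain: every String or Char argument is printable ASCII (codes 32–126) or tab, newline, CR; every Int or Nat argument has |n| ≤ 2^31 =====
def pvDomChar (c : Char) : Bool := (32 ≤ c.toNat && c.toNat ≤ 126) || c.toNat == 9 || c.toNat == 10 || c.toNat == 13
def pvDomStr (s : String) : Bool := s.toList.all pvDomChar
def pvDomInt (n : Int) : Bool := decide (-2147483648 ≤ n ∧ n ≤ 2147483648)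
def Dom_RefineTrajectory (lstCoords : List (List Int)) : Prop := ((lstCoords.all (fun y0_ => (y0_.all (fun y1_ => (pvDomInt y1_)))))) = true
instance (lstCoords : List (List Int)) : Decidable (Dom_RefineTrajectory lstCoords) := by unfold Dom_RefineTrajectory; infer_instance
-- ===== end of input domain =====

-- B replaces A's four staged lists (two derivative lists, a change-flag list, an index list)
-- by one pass that compares consecutive first differences directly; objective: simpler.


-- ===== PORT A =====
-- helper DerivateCoord; list indexing is in range whenever Pre_ holds, so getD's default is never used there
def DerivateCoordPort (lstCoords : List (List Int)) : List (List Int) :=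
  let n := lstCoords.length
  if 2 ≤ n then
    (List.range (n - 1)).foldl (fun acc i =>
      let dx := (lstCoords.getD (i + 1) []).getD 0 0 - (lstCoords.getD i []).getD 0 0
      let dy := (lstCoords.getD (i + 1) []).getD 1 0 - (lstCoords.getD i []).getD 1 0
      acc ++ [[dx, dy]]) []
  else [[0, 0]]

def RefineTrajectory (lstCoords : List (List Int)) : List (List Int) :=
  let lstD1 := DerivateCoordPort lstCoords
  let lstD2 := DerivateCoordPort lstD1
  let lstChanges : List Int := (List.range lstD2.length).foldl (fun acc i =>
      if (lstD2.getD i []).getD 0 0 = 0 ∧ (lstD2.getD i []).getD 1 0 = 0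
      then acc ++ [0] else acc ++ [1]) []
  -- indices are the nonnegative ints i+1; kept as Nat
  let lstIndex : List Nat := (List.range lstChanges.length).foldl (fun acc i =>
      if lstChanges.getD i 0 ≠ 0 then acc ++ [i + 1] else acc) []
  (List.range lstIndex.length).foldl (fun acc i =>
      acc ++ [lstCoords.getD (lstIndex.getD i 0) []]) [lstCoords.getD 0 []]

-- ===== PORT B =====
def RefineTrajectory_alt (lstCoords : List (List Int)) : List (List Int) :=
  (List.range' 1 (lstCoords.length - 2)).foldl (fun res j =>
    let p := lstCoords.getD (j - 1) []
    let c := lstCoords.getD j []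
    let nxt := lstCoords.getD (j + 1) []
    if nxt.getD 0 0 - c.getD 0 0 ≠ c.getD 0 0 - p.getD 0 0 ∨
       nxt.getD 1 0 - c.getD 1 0 ≠ c.getD 1 0 - p.getD 1 0
    then res ++ [c] else res) [lstCoords.getD 0 []]

-- ===== PRECONDITION & SPEC =====
-- Python A raises IndexError on the empty list (lstCoords[0]) and, when len ≥ 2, whenever some
-- point has fewer than 2 components (DerivateCoord reads [0] and [1] of every point).
def Pre_RefineTrajectory (lstCoords : List (List Int)) : Prop :=
  lstCoords ≠ [] ∧ (2 ≤ lstCoords.length → ∀ c ∈ lstCoords, 2 ≤ c.length)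
instance (lstCoords : List (List Int)) : Decidable (Pre_RefineTrajectory lstCoords) := by
  unfold Pre_RefineTrajectory; infer_instance
def pvWitness_RefineTrajectory : List (List Int) := [[0, 0], [1, 1], [2, 2], [4, 2]]

def Spec_RefineTrajectory (lstCoords : List (List Int)) (out : List (List Int)) : Prop := out = RefineTrajectory_alt lstCoords
instance (lstCoords : List (List Int)) (out : List (List Int)) : Decidable (Spec_RefineTrajectory lstCoords out) := by unfold Spec_RefineTrajectory; infer_instance

-- ===== CLAIM (what is proved, stated in full; the proofs are below) =====
def Claim_equal_RefineTrajectory : Prop := ∀ (lstCoords : List (List Int)), Dom_RefineTrajectory lstCoords → Pre_RefineTrajectory lstCoords → Spec_RefineTrajectory lstCoords (RefineTrajectory lstCoords)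

-- ===== LEMMAS AND PROOFS =====

theorem pv_foldl_app {α β : Type} (r : List α) (f : α → β) (init : List β) :
    r.foldl (fun acc i => acc ++ [f i]) init = init ++ r.map f := by
  induction r generalizing init with
  | nil => simp
  | cons a r ih => simp [List.foldl_cons, ih]

theorem pv_foldl_app_if {α β : Type} (r : List α) (p : α → Prop) [DecidablePred p]
    (f : α → β) (init : List β) :
    r.foldl (fun acc i => if p i then acc ++ [f i] else acc) init
      = init ++ (r.filter (fun i => decide (p i))).map f := by
  induction r generalizing init with
  | nil => simp
  | cons a r ih =>
    by_cases h : p a <;> simp [List.foldl_cons, h, ih]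

theorem pv_getD_map_range {β : Type} (k i : Nat) (g : Nat → β) (d : β) (hi : i < k) :
    ((List.range k).map g).getD i d = g i := by
  simp [List.getD, hi]


theorem pv_foldl_app_ite {α β : Type} (r : List α) (p : α → Prop) [DecidablePred p]
    (u v : β) (init : List β) :
    r.foldl (fun acc i => if p i then acc ++ [u] else acc ++ [v]) init
      = init ++ r.map (fun i => if p i then u else v) := by
  induction r generalizing init with
  | nil => simp
  | cons a r ih => by_cases h : p a <;> simp [List.foldl_cons, h, ih]

theorem pv_map_getD_map_range {α β γ : Type} (l : List α) (g : α → β) (d : β) (h : β → γ) :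
    (List.range l.length).map (fun i => h ((l.map g).getD i d)) = l.map (fun x => h (g x)) := by
  apply List.ext_getElem
  · simp
  · intro k h1 h2
    rw [List.length_map] at h2
    simp [List.getD, List.getElem?_eq_getElem h2]

theorem pv_range'_one (k : Nat) :
    List.range' 1 k = (List.range k).map (fun i => i + 1) := by
  simp [List.range'_eq_map_range, Nat.add_comm]

theorem pv_der_eq (lst : List (List Int)) (h2 : 2 ≤ lst.length) :
    DerivateCoordPort lst = (List.range (lst.length - 1)).map (fun i =>
      [(lst.getD (i + 1) []).getD 0 0 - (lst.getD i []).getD 0 0,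
       (lst.getD (i + 1) []).getD 1 0 - (lst.getD i []).getD 1 0]) := by
  simp only [DerivateCoordPort, if_pos h2]
  exact pv_foldl_app _ _ _

theorem pv_main_ge3 (lst : List (List Int)) (h3 : 3 ≤ lst.length) :
    RefineTrajectory lst = RefineTrajectory_alt lst := by
  have hd2 : DerivateCoordPort (DerivateCoordPort lst)
      = (List.range (lst.length - 2)).map (fun i =>
        [((lst.getD (i+2) []).getD 0 0 - (lst.getD (i+1) []).getD 0 0)
           - ((lst.getD (i+1) []).getD 0 0 - (lst.getD i []).getD 0 0),
         ((lst.getD (i+2) []).getD 1 0 - (lst.getD (i+1) []).getD 1 0)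
           - ((lst.getD (i+1) []).getD 1 0 - (lst.getD i []).getD 1 0)]) := by
    rw [pv_der_eq lst (by omega), pv_der_eq _ (by simp; omega)]
    simp only [List.length_map, List.length_range]
    have h12 : lst.length - 1 - 1 = lst.length - 2 := by omega
    rw [h12]
    apply List.map_congr_left
    intro i hi
    rw [List.mem_range] at hi
    rw [pv_getD_map_range (lst.length - 1) (i+1) _ _ (by omega),
        pv_getD_map_range (lst.length - 1) i _ _ (by omega)]
    rfl
  simp only [RefineTrajectory, RefineTrajectory_alt, hd2, pv_foldl_app_ite,
    pv_foldl_app_if, pv_foldl_app, List.length_map, List.length_range, List.nil_append]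
  rw [pv_map_getD_map_range (List.filter _ (List.range (lst.length - 2)))
        (fun i => i + 1) 0 (fun k => lst.getD k []),
      pv_range'_one, List.filter_map, List.map_map]
  congr 1
  congr 1
  apply List.filter_congr
  intro i hi
  rw [List.mem_range] at hi
  rw [pv_getD_map_range _ _ _ _ hi, pv_getD_map_range _ _ _ _ hi]
  simp only [Function.comp_apply]
  rw [show i + 1 + 1 = i + 2 from rfl, show i + 1 - 1 = i from rfl]
  simp only [List.getD_cons_zero, List.getD_cons_succ]
  rw [decide_eq_decide]
  constructor
  · intro h
    split_ifs at h with hc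
    · exact absurd rfl h
    · omega
  · intro h
    split_ifs with hc
    · omega
    · exact one_ne_zero

theorem RefineTrajectory_spec : Claim_equal_RefineTrajectory := by
  intro lst _hdom hpre
  unfold Spec_RefineTrajectory
  match lst, hpre with
  | [], hpre => exact absurd rfl hpre.1
  | [a], _ => rfl
  | [a, b], _ => rfl
  | (a :: b :: c :: rest), _ => exact pv_main_ge3 _ (by simp)
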